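-- pv_equiv track=rewrite | github.com/99Probl3ms/epgiconmerge | app.py | parse_m3u
-- ===== SOURCE A (Python) =====
-- def parse_m3u(m3u_content):
--     """Parse M3U playlist into entries
--
--     Returns:
--         list: List of tuples (extinf_line, url_line)
--     """
--     lines = m3u_content.strip().split('\n')
--     entries = []
--
--     i = 0
--     while i < len(lines):
--         line = lines[i].strip()
--
--         if line.startswith('#EXTINF:'):
--             extinf_line = line
--             # Get the next non-empty, non-comment line as the URL
--             i += 1
--             while i < len(lines):
--                 url_line = lines[i].strip()
--                 if url_line and not url_line.startswith('#'):
--                     entries.append((extinf_line, url_line))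
--                     break
--                 elif url_line.startswith('#'):
--                     # Skip other comment lines
--                     i += 1
--                 else:
--                     i += 1
--         i += 1
--
--     return entries
-- ===== SOURCE B (Python) =====
-- def parse_m3u(m3u_content):
--     """Parse M3U playlist into entries
--
--     Returns:
--         list: List of tuples (extinf_line, url_line)
--     """
--     entries = []
--     pending = None
--     for raw in m3u_content.strip().split('\n'):
--         line = raw.strip()
--         if pending is None:
--             if line.startswith('#EXTINF:'):
--                 pending = line
--         elif line and not line.startswith('#'):
--             entries.append((pending, line))
--             pending = None
--     return entries
-- ===== Notes on version B (the rewrite author's own statement) =====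
-- stated objective: simpler
-- what changed: Replaced the nested index-driven while loops with a single flat for-pass over the stripped lines using a two-state machine whose state variable holds the last unmatched EXTINF line, appending a pair when a non-empty non-comment line follows.
import Mathlib
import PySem

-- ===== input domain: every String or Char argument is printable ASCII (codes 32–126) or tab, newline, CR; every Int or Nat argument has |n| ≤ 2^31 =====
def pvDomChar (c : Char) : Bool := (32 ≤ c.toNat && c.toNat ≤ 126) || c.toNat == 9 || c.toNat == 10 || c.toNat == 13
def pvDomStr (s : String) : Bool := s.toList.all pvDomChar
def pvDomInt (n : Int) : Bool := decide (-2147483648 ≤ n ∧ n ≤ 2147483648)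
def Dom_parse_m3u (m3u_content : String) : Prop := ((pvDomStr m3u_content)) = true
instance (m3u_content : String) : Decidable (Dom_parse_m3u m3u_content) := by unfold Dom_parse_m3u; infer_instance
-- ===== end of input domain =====

-- B replaces A's nested index-driven while loops by one flat fold with a 'pending' state
-- variable (a two-state machine); objective: simpler. Same return value on every input.

-- ===== PORT A =====
-- '.strip().split('\n')' of either program; sep "\n" ≠ "" so split? is always some and
-- the .getD [] is exact.
def pvLines (m3u_content : String) : List String :=
  (PySem.Str.split? (PySem.Str.strip m3u_content) "\n").getD []

-- inner 'while i < len(lines)' loop of A: scan for the next non-empty non-comment line;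
-- returns (the found url line if any, the index the loop stopped at)
def pvA_inner (lines : List String) (i : Nat) : Option String × Nat :=
  if h : i < lines.length then
    if PySem.Str.strip lines[i] ≠ "" ∧
        PySem.Str.startswith (PySem.Str.strip lines[i]) "#" = false then
      (some (PySem.Str.strip lines[i]), i)
    else
      -- both the '#'-comment branch and the empty-line branch do i += 1
      pvA_inner lines (i + 1)
  else (none, i)
termination_by lines.length - i

theorem pvA_inner_le (lines : List String) (i : Nat) : i ≤ (pvA_inner lines i).2 := by
  rw [pvA_inner]
  split
  · split
    · simp
    · exact le_trans (Nat.le_succ i) (pvA_inner_le lines (i + 1))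
  · simp
termination_by lines.length - i

-- outer 'while i < len(lines)' loop of A
def pvA_outer (lines : List String) (i : Nat) (entries : List (String × String)) :
    List (String × String) :=
  if h : i < lines.length then
    if PySem.Str.startswith (PySem.Str.strip lines[i]) "#EXTINF:" then
      match hm : pvA_inner lines (i + 1) with
      | (some url, j) => pvA_outer lines (j + 1) (entries ++ [(PySem.Str.strip lines[i], url)])
      | (none, j) => pvA_outer lines (j + 1) entries
    else
      pvA_outer lines (i + 1) entries
  else entries
termination_by lines.length - i
decreasing_by
  · have := pvA_inner_le lines (i + 1); rw [hm] at this; simp at this; omega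
  · have := pvA_inner_le lines (i + 1); rw [hm] at this; simp at this; omega
  · omega

def parse_m3u (m3u_content : String) : List (String × String) :=
  pvA_outer (pvLines m3u_content) 0 []

-- ===== PORT B =====
-- one flat pass; state = (entries so far, pending EXTINF line or none)
def pvB_step (st : List (String × String) × Option String) (raw : String) :
    List (String × String) × Option String :=
  let line := PySem.Str.strip raw
  match st.2 with
  | none =>
      if PySem.Str.startswith line "#EXTINF:" then (st.1, some line) else st
  | some p =>
      if line ≠ "" ∧ PySem.Str.startswith line "#" = false then
        (st.1 ++ [(p, line)], none)
      else st

def parse_m3u_alt (m3u_content : String) : List (String × String) :=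
  ((pvLines m3u_content).foldl pvB_step ([], none)).1

-- ===== PRECONDITION & SPEC =====
def Spec_parse_m3u (m3u_content : String) (out : List (String × String)) : Prop := out = parse_m3u_alt m3u_content
instance (m3u_content : String) (out : List (String × String)) : Decidable (Spec_parse_m3u m3u_content out) := by unfold Spec_parse_m3u; infer_instance

-- ===== CLAIM (what is proved, stated in full; the proofs are below) =====
def Claim_equal_parse_m3u : Prop := ∀ (m3u_content : String), Dom_parse_m3u m3u_content → Spec_parse_m3u m3u_content (parse_m3u m3u_content)

-- ===== LEMMAS AND PROOFS =====

-- A's inner scan, read through B's fold: folding the pending state over the suffix from i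
-- consumes the lines up to and including A's found url line (if any).
theorem pvB_fold_inner (lines : List String) (i : Nat) (p : String)
    (entries : List (String × String)) :
    (lines.drop i).foldl pvB_step (entries, some p) =
      match pvA_inner lines i with
      | (some url, j) => (lines.drop (j + 1)).foldl pvB_step (entries ++ [(p, url)], none)
      | (none, _) => (entries, some p) := by
  by_cases h : i < lines.length
  · rw [List.drop_eq_getElem_cons h, List.foldl_cons, pvA_inner, dif_pos h]
    by_cases hurl : PySem.Str.strip lines[i] ≠ "" ∧
        PySem.Str.startswith (PySem.Str.strip lines[i]) "#" = false
    · rw [if_pos hurl]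
      have hstep : pvB_step (entries, some p) lines[i] =
          (entries ++ [(p, PySem.Str.strip lines[i])], none) := by
        simp only [pvB_step, if_pos hurl]
      rw [hstep]
    · rw [if_neg hurl]
      have hstep : pvB_step (entries, some p) lines[i] = (entries, some p) := by
        simp only [pvB_step, if_neg hurl]
      rw [hstep, pvB_fold_inner lines (i + 1) p entries]
  · rw [pvA_inner, dif_neg h, List.drop_eq_nil_of_le (Nat.le_of_not_lt h), List.foldl_nil]
termination_by lines.length - i

-- if A's inner scan found no url line, it ran off the end of lines
theorem pvA_inner_none (lines : List String) (i j : Nat)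
    (h : pvA_inner lines i = (none, j)) : lines.length ≤ j := by
  rw [pvA_inner] at h
  split at h
  · split at h
    · exact absurd h (by simp)
    · exact pvA_inner_none lines (i + 1) j h
  · cases h; omega
termination_by lines.length - i

-- A's outer loop equals B's fold (no pending state) over the remaining suffix.
theorem pvB_fold_outer (lines : List String) (i : Nat) (entries : List (String × String)) :
    pvA_outer lines i entries = ((lines.drop i).foldl pvB_step (entries, none)).1 := by
  by_cases h : i < lines.length
  · rw [List.drop_eq_getElem_cons h, List.foldl_cons, pvA_outer, dif_pos h]
    by_cases hext : PySem.Str.startswith (PySem.Str.strip lines[i]) "#EXTINF:" = true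
    · rw [if_pos hext]
      have hstep : pvB_step (entries, none) lines[i] =
          (entries, some (PySem.Str.strip lines[i])) := by
        simp only [pvB_step, if_pos hext]
      rw [hstep, pvB_fold_inner lines (i + 1) (PySem.Str.strip lines[i]) entries]
      rcases hm : pvA_inner lines (i + 1) with ⟨url?, j⟩
      cases url? with
      | some url =>
          simp only
          exact pvB_fold_outer lines (j + 1) (entries ++ [(PySem.Str.strip lines[i], url)])
      | none =>
          simp only
          rw [pvB_fold_outer lines (j + 1) entries]
          have hj : lines.length ≤ j := pvA_inner_none lines (i + 1) j hm
          rw [List.drop_eq_nil_of_le (by omega), List.foldl_nil]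
    · rw [if_neg hext]
      have hstep : pvB_step (entries, none) lines[i] = (entries, none) := by
        simp only [pvB_step, if_neg hext]
      rw [hstep, pvB_fold_outer lines (i + 1) entries]
  · rw [pvA_outer, dif_neg h, List.drop_eq_nil_of_le (Nat.le_of_not_lt h), List.foldl_nil]
termination_by lines.length - i
decreasing_by
  · have := pvA_inner_le lines (i + 1); rw [hm] at this; simp at this; omega
  · have := pvA_inner_le lines (i + 1); rw [hm] at this; simp at this; omega
  · omega

-- ===== VERDICT (by name: the statement is the Claim_ definition above) =====
theorem parse_m3u_spec : Claim_equal_parse_m3u := by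
  intro s _
  unfold Spec_parse_m3u parse_m3u parse_m3u_alt
  simpa using pvB_fold_outer (pvLines s) 0 []
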